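-- pv_equiv track=rewrite | github.com/Cswish24/data_structures_and_algorithms_classwork | more_practice/number_factor.py | num_fac_td
-- ===== SOURCE A (Python) =====
-- def num_fac_td(n, dict={}):
--     if n in (0, 1, 2):
--         return 1
--     elif n == 3:
--         return 2
--     else:
--         if n in dict:
--             return dict[n]
--         else:
--             dict[n-1] = num_fac_td(n-1)
--             dict[n-3] = num_fac_td(n-3)
--             dict[n-4] = num_fac_td(n-4)
--             return dict[n-1] + dict[n-3] + dict[n-4]
-- ===== SOURCE B (Python) =====
-- def num_fac_td(n, dict={}):
--     if n in (0, 1, 2):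
--         return 1
--     if n == 3:
--         return 2
--     a, b, c, d = 1, 1, 1, 2
--     for _ in range(4, n + 1):
--         a, b, c, d = b, c, d, d + b + a
--     return d
-- ===== Notes on version B (the rewrite author's own statement) =====
-- stated objective: simpler
-- what changed: Replaces the memoized top-down recursion (shared mutable default-dict cache) with an iterative bottom-up recurrence on four rolling variables; O(1) space, no cross-call state.
import Mathlib
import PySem

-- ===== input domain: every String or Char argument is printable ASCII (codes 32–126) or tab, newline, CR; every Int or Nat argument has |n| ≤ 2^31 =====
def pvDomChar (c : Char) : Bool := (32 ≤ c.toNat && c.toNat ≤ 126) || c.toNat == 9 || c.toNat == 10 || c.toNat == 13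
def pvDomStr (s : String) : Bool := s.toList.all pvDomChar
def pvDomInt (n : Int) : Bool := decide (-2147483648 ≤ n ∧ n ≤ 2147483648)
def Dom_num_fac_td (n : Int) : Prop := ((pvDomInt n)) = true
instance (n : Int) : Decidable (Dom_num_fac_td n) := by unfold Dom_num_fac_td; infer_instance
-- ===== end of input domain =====

-- B replaces A's memoized top-down recursion with a bottom-up loop on four rolling variables (simpler, O(1) space).

-- ===== PORT A =====
-- A's general recursion is ported with a fuel parameter (fuel n.toNat+1 suffices: each call
-- consumes one unit and each recursive call decreases n by at least 1); the shared mutable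
-- memo dict is threaded as explicit state, exactly following the statement order of A.
def numFacGoA (fuel : Nat) (n : Int) (d : PySem.Dict Int Int) : Int × PySem.Dict Int Int :=
  match fuel with
  | 0 => (0, d)   -- unreachable for 0 ≤ n with fuel > n.toNat
  | f + 1 =>
    if n = 0 ∨ n = 1 ∨ n = 2 then (1, d)
    else if n = 3 then (2, d)
    else
      match d.get? n with
      | some v => (v, d)
      | none =>
        let r1 := numFacGoA f (n - 1) d
        let d1 := r1.2.insert (n - 1) r1.1
        let r3 := numFacGoA f (n - 3) d1
        let d3 := r3.2.insert (n - 3) r3.1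
        let r4 := numFacGoA f (n - 4) d3
        let d4 := r4.2.insert (n - 4) r4.1
        (d4.getD (n - 1) 0 + d4.getD (n - 3) 0 + d4.getD (n - 4) 0, d4)

def num_fac_td (n : Int) : Int := (numFacGoA (n.toNat + 1) n PySem.Dict.empty).1

-- ===== PORT B =====
def num_fac_td_alt (n : Int) : Int :=
  if n = 0 ∨ n = 1 ∨ n = 2 then 1
  else if n = 3 then 2
  else
    let s := (PySem.List.pyRange 4 (n + 1) 1).foldl
      (fun (s : Int × Int × Int × Int) _ => (s.2.1, s.2.2.1, s.2.2.2, s.2.2.2 + s.2.1 + s.1))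
      (1, 1, 1, 2)
    s.2.2.2

-- ===== PRECONDITION & SPEC =====
-- Pre_ excludes negative n (A recurses without bound: RecursionError) and n > 900 (A hits
-- CPython's recursion limit shortly above that; the exact failing threshold depends on the
-- interpreter and on the memo cache left by earlier calls, so the bound is conservative —
-- claim.json cites an excluded n where both programs still return the same value).
def Pre_num_fac_td (n : Int) : Prop := 0 ≤ n ∧ n ≤ 900
instance (n : Int) : Decidable (Pre_num_fac_td n) := by unfold Pre_num_fac_td; infer_instance
def pvWitness_num_fac_td : Int := 10

def Spec_num_fac_td (n : Int) (out : Int) : Prop := out = num_fac_td_alt n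
instance (n : Int) (out : Int) : Decidable (Spec_num_fac_td n out) := by unfold Spec_num_fac_td; infer_instance

-- ===== CLAIM (what is proved, stated in full; the proofs are below) =====
def Claim_equal_num_fac_td : Prop := ∀ (n : Int), Dom_num_fac_td n → Pre_num_fac_td n → Spec_num_fac_td n (num_fac_td n)

-- ===== LEMMAS AND PROOFS =====

-- the mathematical recurrence both programs compute
def trib : Nat → Int
  | 0 => 1
  | 1 => 1
  | 2 => 1
  | 3 => 2
  | n + 4 => trib (n + 3) + trib (n + 1) + trib n

-- every entry of the memo dict is a correct value of trib at a nonnegative key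
def InvA (d : PySem.Dict Int Int) : Prop :=
  ∀ k v, d.get? k = some v → ∃ m : Nat, k = (m : Int) ∧ v = trib m

theorem numFacGoA_mono (fuel : Nat) (n : Int) (d : PySem.Dict Int Int) (k : Int)
    (h : (d.get? k).isSome) : ((numFacGoA fuel n d).2.get? k).isSome := by
  induction fuel generalizing n d with
  | zero => simpa [numFacGoA] using h
  | succ f ih =>
    simp only [numFacGoA]
    split
    · exact h
    · split
      · exact h
      · cases hd : d.get? n with
        | some v => simpa using h
        | none =>
          simp only []
          rw [PySem.Dict.get?_insert]
          split
          · simp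
          · exact ih _ _ (by
              rw [PySem.Dict.get?_insert]
              split
              · simp
              · exact ih _ _ (by
                  rw [PySem.Dict.get?_insert]
                  split
                  · simp
                  · exact ih _ _ h))

theorem insert_invA (d : PySem.Dict Int Int) (k : Int) (hk : 0 ≤ k) (v : Int)
    (hv : v = trib k.toNat) (hInv : InvA d) : InvA (d.insert k v) := by
  intro j w hj
  rw [PySem.Dict.get?_insert] at hj
  split at hj
  · rename_i hjk
    refine ⟨k.toNat, by omega, ?_⟩
    rw [hv] at hj
    exact (Option.some_inj.mp hj).symm
  · exact hInv j w hj

theorem numFacGoA_correct (fuel : Nat) (n : Int) (d : PySem.Dict Int Int)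
    (hn : 0 ≤ n) (hf : n.toNat < fuel) (hInv : InvA d) :
    (numFacGoA fuel n d).1 = trib n.toNat ∧ InvA (numFacGoA fuel n d).2 := by
  induction fuel generalizing n d with
  | zero => omega
  | succ f ih =>
    simp only [numFacGoA]
    split
    · rename_i h012
      rcases h012 with h | h | h <;> subst h <;> exact ⟨rfl, hInv⟩
    · split
      · rename_i _ h3
        subst h3
        exact ⟨rfl, hInv⟩
      · rename_i h012 h3
        have hn4 : 4 ≤ n := by
          rcases Int.lt_or_le n 4 with h | h
          · exfalso; omega
          · exact h
        cases hd : d.get? n with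
        | some v =>
          obtain ⟨m, hm, hv⟩ := hInv n v hd
          have hveq : v = trib n.toNat := by rw [hv]; congr 1; omega
          exact ⟨hveq, hInv⟩
        | none =>
          simp only []
          -- call at n-1
          have h1 := ih (n - 1) d (by omega) (by omega) hInv
          have hInv1 : InvA ((numFacGoA f (n - 1) d).2.insert (n - 1) (numFacGoA f (n - 1) d).1) :=
            insert_invA _ _ (by omega) _ h1.1 h1.2
          -- call at n-3
          have h3c := ih (n - 3) _ (by omega) (by omega) hInv1
          have hInv3 : InvA ((numFacGoA f (n - 3) _).2.insert (n - 3) (numFacGoA f (n - 3) _).1) :=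
            insert_invA _ _ (by omega) _ h3c.1 h3c.2
          -- call at n-4
          have h4c := ih (n - 4) _ (by omega) (by omega) hInv3
          have hInv4 : InvA ((numFacGoA f (n - 4) _).2.insert (n - 4) (numFacGoA f (n - 4) _).1) :=
            insert_invA _ _ (by omega) _ h4c.1 h4c.2
          refine ⟨?_, hInv4⟩
          -- the three keys are still present in the final dict
          set d1 := (numFacGoA f (n - 1) d).2.insert (n - 1) (numFacGoA f (n - 1) d).1 with hd1
          set d3 := (numFacGoA f (n - 3) d1).2.insert (n - 3) (numFacGoA f (n - 3) d1).1 with hd3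
          set d4 := (numFacGoA f (n - 4) d3).2.insert (n - 4) (numFacGoA f (n - 4) d3).1 with hd4
          have p1 : (d4.get? (n - 1)).isSome := by
            rw [hd4, PySem.Dict.get?_insert]
            split
            · simp
            · refine numFacGoA_mono _ _ _ _ ?_
              rw [hd3, PySem.Dict.get?_insert]
              split
              · simp
              · refine numFacGoA_mono _ _ _ _ ?_
                rw [hd1, PySem.Dict.get?_insert]
                simp
          have p3 : (d4.get? (n - 3)).isSome := by
            rw [hd4, PySem.Dict.get?_insert]
            split
            · simp
            · refine numFacGoA_mono _ _ _ _ ?_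
              rw [hd3, PySem.Dict.get?_insert]
              simp
          have p4 : (d4.get? (n - 4)).isSome := by
            rw [hd4, PySem.Dict.get?_insert]; simp
          have val : ∀ j : Int, 0 ≤ j → (d4.get? j).isSome → d4.getD j 0 = trib j.toNat := by
            intro j hj hs
            cases hg : d4.get? j with
            | none => rw [hg] at hs; simp at hs
            | some v =>
              obtain ⟨m, hm, hv⟩ := hInv4 j v hg
              rw [PySem.Dict.getD_eq_get?_getD, hg]
              simp only [Option.getD_some]
              rw [hv]; congr 1; omega
          rw [val _ (by omega) p1, val _ (by omega) p3, val _ (by omega) p4]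
          obtain ⟨j, hj⟩ : ∃ j : Nat, n.toNat = j + 4 := ⟨n.toNat - 4, by omega⟩
          have r1 : (n - 1).toNat = j + 3 := by omega
          have r3 : (n - 3).toNat = j + 1 := by omega
          have r4 : (n - 4).toNat = j := by omega
          rw [r1, r3, r4, hj]
          simp [trib]

-- B's fold computes the same recurrence bottom-up
theorem foldB (k : Nat) :
    (PySem.List.pyRange 4 (((k : Int) + 3) + 1) 1).foldl
      (fun (s : Int × Int × Int × Int) _ => (s.2.1, s.2.2.1, s.2.2.2, s.2.2.2 + s.2.1 + s.1))
      (1, 1, 1, 2) = (trib k, trib (k + 1), trib (k + 2), trib (k + 3)) := by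
  induction k with
  | zero =>
    rw [PySem.List.pyRange_one_eq_nil (by omega)]
    simp [trib]
  | succ k ih =>
    have : ((((k : Nat) + 1 : Nat) : Int) + 3) + 1 = (((k : Int) + 3) + 1) + 1 := by push_cast; ring
    rw [this, PySem.List.pyRange_one_succ_right (by omega), List.foldl_append, ih]
    simp only [List.foldl_cons, List.foldl_nil]
    have h4 : trib (k + 4) = trib (k + 3) + trib (k + 1) + trib k := rfl
    have e1 : k + 1 + 1 = k + 2 := rfl
    have e2 : k + 1 + 2 = k + 3 := rfl
    have e3 : k + 1 + 3 = k + 4 := rfl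
    rw [e1, e2, e3, h4]

theorem alt_eq_trib (n : Int) (hn : 0 ≤ n) : num_fac_td_alt n = trib n.toNat := by
  unfold num_fac_td_alt
  split
  · rename_i h
    rcases h with h | h | h <;> subst h <;> rfl
  · split
    · rename_i _ h3
      subst h3; rfl
    · rename_i h012 h3
      have hn4 : 4 ≤ n := by
        rcases Int.lt_or_le n 4 with h | h
        · exfalso; omega
        · exact h
      obtain ⟨k, hk⟩ : ∃ k : Nat, n = ((k : Int) + 3) ∧ True := ⟨(n - 3).toNat, by omega, trivial⟩
      obtain ⟨hk1, -⟩ := hk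
      simp only [hk1]
      rw [foldB]
      have : ((k : Int) + 3).toNat = k + 3 := by omega
      rw [this]

-- ===== VERDICT (by name: the statement is the Claim_ definition above) =====
theorem num_fac_td_spec : Claim_equal_num_fac_td := by
  intro n _ hpre
  obtain ⟨h0, _⟩ := hpre
  unfold Spec_num_fac_td num_fac_td
  have hA := numFacGoA_correct (n.toNat + 1) n PySem.Dict.empty h0 (by omega)
    (by intro k v hk; simp [PySem.Dict.get?_empty] at hk)
  rw [hA.1, alt_eq_trib n h0]
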